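-- pv_equiv track=rewrite | github.com/neurosutras/optimize_cells | simple_network_utils.py | get_pop_gid_ranges
-- ===== SOURCE A (Python) =====
-- def get_pop_gid_ranges(pop_sizes):
--     """
--
--     :param pop_sizes: dict: {str: int}
--     :return: dict: {str: tuple of int}
--     """
--     prev_gid = 0
--     pop_gid_ranges = dict()
--     for pop_name in pop_sizes:
--         next_gid = prev_gid + pop_sizes[pop_name]
--         pop_gid_ranges[pop_name] = (prev_gid, next_gid)
--         prev_gid += pop_sizes[pop_name]
--     return pop_gid_ranges
-- ===== SOURCE B (Python) =====
-- def get_pop_gid_ranges(pop_sizes):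
--     """
--
--     :param pop_sizes: dict: {str: int}
--     :return: dict: {str: tuple of int}
--     """
--     # Build the full table of cumulative boundaries [0, s1, s1+s2, ...] first,
--     # then pair adjacent boundaries in a separate zipping pass.
--     bounds = [0]
--     for size in pop_sizes.values():
--         bounds.append(bounds[-1] + size)
--     return dict(zip(pop_sizes, zip(bounds, bounds[1:])))
-- ===== Notes on version B (the rewrite author's own statement) =====
-- stated objective: idiomatic
-- what changed: B first materialises the list of cumulative boundaries [0, s1, s1+s2, ...] with a prefix-sum pass and then forms the result dict in a separate pass by zipping the keys with adjacent boundary pairs, instead of A's single loop that interleaves a running sum with per-key dict lookups and insertions.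
import Mathlib
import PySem

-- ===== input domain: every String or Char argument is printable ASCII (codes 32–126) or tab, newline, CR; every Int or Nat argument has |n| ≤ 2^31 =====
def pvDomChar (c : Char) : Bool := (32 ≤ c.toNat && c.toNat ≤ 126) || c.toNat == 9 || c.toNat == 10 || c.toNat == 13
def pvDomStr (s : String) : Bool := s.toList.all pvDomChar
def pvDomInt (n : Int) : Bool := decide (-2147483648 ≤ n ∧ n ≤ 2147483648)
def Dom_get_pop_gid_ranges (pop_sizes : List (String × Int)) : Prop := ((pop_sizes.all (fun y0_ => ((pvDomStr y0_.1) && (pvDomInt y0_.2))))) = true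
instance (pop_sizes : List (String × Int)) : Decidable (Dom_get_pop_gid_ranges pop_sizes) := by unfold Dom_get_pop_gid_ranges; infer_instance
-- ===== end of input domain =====

-- B builds the boundary table [0, s1, s1+s2, ...] by a prefix-sum pass and then zips keys with
-- adjacent boundary pairs in a second pass, instead of A's single interleaved running-sum loop.

-- ===== PORT A =====
def get_pop_gid_ranges (pop_sizes : List (String × Int)) : List (String × Int × Int) :=
  -- d is the input dict; 'for pop_name in pop_sizes' iterates its keys,
  -- 'pop_sizes[pop_name]' is d.getD (the key is always present, so the default 0 is never used)
  let d : PySem.Dict String Int := PySem.Dict.mk pop_sizes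
  (d.keys.foldl
    (fun (st : Int × PySem.Dict String (Int × Int)) pop_name =>
      let next_gid := st.1 + d.getD pop_name 0
      (st.1 + d.getD pop_name 0, st.2.insert pop_name (st.1, next_gid)))
    ((0 : Int), PySem.Dict.empty)).2.items

-- ===== PORT B =====
def get_pop_gid_ranges_alt (pop_sizes : List (String × Int)) : List (String × Int × Int) :=
  -- bounds[-1] is pyGet? at -1 (bounds starts as [0], so it is never empty and the default 0 unused)
  let d : PySem.Dict String Int := PySem.Dict.mk pop_sizes
  let bounds : List Int := d.values.foldl
      (fun b size => b ++ [(PySem.List.pyGet? b (-1)).getD 0 + size]) [0]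
  (PySem.Dict.ofList
    (List.zip d.keys (List.zip bounds (PySem.List.slice bounds (some 1) none)))).items

-- ===== PRECONDITION & SPEC =====
-- Pre_ excludes lists with duplicate keys: the input encodes a Python dict {str: int}, which
-- cannot contain a duplicate key, so such lists do not correspond to any input of the Python A.
def Pre_get_pop_gid_ranges (pop_sizes : List (String × Int)) : Prop :=
  (pop_sizes.map Prod.fst).Nodup
instance (pop_sizes : List (String × Int)) : Decidable (Pre_get_pop_gid_ranges pop_sizes) := by unfold Pre_get_pop_gid_ranges; infer_instance
def pvWitness_get_pop_gid_ranges : (List (String × Int)) := [("a", 2), ("b", 0), ("c", 5)]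

def Spec_get_pop_gid_ranges (pop_sizes : List (String × Int)) (out : List (String × Int × Int)) : Prop := out = get_pop_gid_ranges_alt pop_sizes
instance (pop_sizes : List (String × Int)) (out : List (String × Int × Int)) : Decidable (Spec_get_pop_gid_ranges pop_sizes out) := by unfold Spec_get_pop_gid_ranges; infer_instance

-- ===== CLAIM (what is proved, stated in full; the proofs are below) =====
def Claim_equal_get_pop_gid_ranges : Prop := ∀ (pop_sizes : List (String × Int)), Dom_get_pop_gid_ranges pop_sizes → Pre_get_pop_gid_ranges pop_sizes → Spec_get_pop_gid_ranges pop_sizes (get_pop_gid_ranges pop_sizes)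

-- ===== LEMMAS AND PROOFS =====

/-- The intended result: consecutive (prev, next) ranges starting at `prev`. -/
def pvRanges (prev : Int) : List (String × Int) → List (String × Int × Int)
  | [] => []
  | (k, s) :: rest => (k, prev, prev + s) :: pvRanges (prev + s) rest

/-- Running prefix sums of a list of sizes, starting after total `t`. -/
def pvSums (t : Int) : List Int → List Int
  | [] => []
  | s :: r => (t + s) :: pvSums (t + s) r

lemma pvRanges_map_fst (l : List (String × Int)) : ∀ prev, (pvRanges prev l).map Prod.fst = l.map Prod.fst := by
  induction l with
  | nil => intro prev; rfl
  | cons p rest ih => intro prev; cases p with | mk k s => simp [pvRanges, ih]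

lemma pyGet_neg_one_getLast (b : List Int) (hb : b ≠ []) :
    (PySem.List.pyGet? b (-1)).getD 0 = b.getLast hb := by
  have hlen : 0 < b.length := List.length_pos_iff.mpr hb
  simp only [PySem.List.pyGet?, PySem.List.pyIdx?]
  have h1 : ¬ (0 : Int) ≤ -1 := by omega
  have h2 : -(b.length : Int) ≤ -1 := by omega
  simp only [h1, if_false, h2, if_true, Option.bind]
  have : b[b.length - 1]? = some (b.getLast hb) := by
    rw [← List.getLast?_eq_getElem?, List.getLast?_eq_getLast_of_ne_nil hb]
  simp [this]

lemma A_loop (d : PySem.Dict String Int) :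
    ∀ (l : List (String × Int)) (prev : Int) (acc : PySem.Dict String (Int × Int)),
    (∀ p ∈ l, d.getD p.1 0 = p.2) → (l.map Prod.fst).Nodup →
    (∀ p ∈ l, acc.contains p.1 = false) →
    ((l.map Prod.fst).foldl
      (fun (st : Int × PySem.Dict String (Int × Int)) pop_name =>
        (st.1 + d.getD pop_name 0, st.2.insert pop_name (st.1, st.1 + d.getD pop_name 0)))
      (prev, acc)).2.items = acc.items ++ pvRanges prev l := by
  intro l
  induction l with
  | nil => intro prev acc _ _ _; simp [pvRanges]
  | cons p rest ih =>
    intro prev acc hval hnd hacc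
    cases p with | mk k s =>
    have hks : d.getD k 0 = s := hval (k, s) (List.mem_cons_self)
    have hk_acc : acc.contains k = false := hacc (k, s) (List.mem_cons_self)
    rw [List.map_cons] at hnd
    have hnd' : (rest.map Prod.fst).Nodup := hnd.of_cons
    have hknr : k ∉ rest.map Prod.fst := (List.nodup_cons.mp hnd).1
    simp only [List.map_cons, List.foldl_cons]
    rw [hks]
    rw [ih (prev + s) (acc.insert k (prev, prev + s))
      (fun p hp => hval p (List.mem_cons_of_mem _ hp)) hnd'
      (by
        intro p hp
        rw [PySem.Dict.contains_insert]
        have h1 : acc.contains p.1 = false := hacc p (List.mem_cons_of_mem _ hp)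
        have h2 : p.1 ≠ k := by
          intro h; exact hknr (h ▸ List.mem_map_of_mem hp)
        simp [h1, h2])]
    rw [PySem.Dict.items_insert_of_not_contains _ _ hk_acc]
    simp [pvRanges]

lemma A_char (pop_sizes : List (String × Int)) (hnd : (pop_sizes.map Prod.fst).Nodup) :
    get_pop_gid_ranges pop_sizes = pvRanges 0 pop_sizes := by
  unfold get_pop_gid_ranges
  dsimp only
  have hkeys : (PySem.Dict.mk pop_sizes).keys = pop_sizes.map Prod.fst := by
    simp [PySem.Dict.keys]
  rw [show (PySem.Dict.mk pop_sizes).keys = pop_sizes.map Prod.fst from hkeys]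
  rw [A_loop (PySem.Dict.mk pop_sizes) pop_sizes 0 PySem.Dict.empty
    (fun p hp => by
      have : (PySem.Dict.mk pop_sizes).keys.Nodup := by rw [hkeys]; exact hnd
      exact PySem.Dict.getD_of_mem_items _ (by simpa using hp) this 0)
    hnd (fun p _ => by simp)]
  simp [PySem.Dict.empty]

lemma B_bounds : ∀ (sizes : List Int) (b : List Int) (hb : b ≠ []),
    sizes.foldl (fun b size => b ++ [(PySem.List.pyGet? b (-1)).getD 0 + size]) b
      = b ++ pvSums (b.getLast hb) sizes := by
  intro sizes
  induction sizes with
  | nil => intro b hb; simp [pvSums]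
  | cons s r ih =>
    intro b hb
    simp only [List.foldl_cons]
    rw [pyGet_neg_one_getLast b hb]
    rw [ih (b ++ [b.getLast hb + s]) (by simp)]
    have hlast : (b ++ [b.getLast hb + s]).getLast (by simp) = b.getLast hb + s := by
      simp
    rw [hlast]
    simp [pvSums]

lemma B_zip (l : List (String × Int)) : ∀ prev,
    List.zip (l.map Prod.fst)
      (List.zip (prev :: pvSums prev (l.map Prod.snd)) (pvSums prev (l.map Prod.snd)))
      = pvRanges prev l := by
  induction l with
  | nil => intro prev; rfl
  | cons p rest ih =>
    intro prev
    cases p with | mk k s =>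
    simp only [List.map_cons, pvSums, pvRanges, List.zip_cons_cons]
    exact congrArg _ (ih (prev + s))

lemma B_char (pop_sizes : List (String × Int)) (hnd : (pop_sizes.map Prod.fst).Nodup) :
    get_pop_gid_ranges_alt pop_sizes = pvRanges 0 pop_sizes := by
  unfold get_pop_gid_ranges_alt
  dsimp only
  have hkeys : (PySem.Dict.mk pop_sizes).keys = pop_sizes.map Prod.fst := by
    simp [PySem.Dict.keys]
  have hvals : (PySem.Dict.mk pop_sizes).values = pop_sizes.map Prod.snd := by
    simp [PySem.Dict.values]
  rw [hkeys, hvals]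
  rw [B_bounds (pop_sizes.map Prod.snd) [0] (by simp)]
  have hl0 : ([(0 : Int)]).getLast (by simp) = 0 := rfl
  rw [hl0]
  rw [PySem.List.slice_from_one]
  have hcons : ([(0 : Int)] ++ pvSums 0 (pop_sizes.map Prod.snd))
      = 0 :: pvSums 0 (pop_sizes.map Prod.snd) := rfl
  rw [hcons]
  have htail : (0 :: pvSums 0 (pop_sizes.map Prod.snd)).tail
      = pvSums 0 (pop_sizes.map Prod.snd) := rfl
  rw [htail, B_zip pop_sizes 0]
  -- now: (Dict.ofList (pvRanges 0 pop_sizes)).items = pvRanges 0 pop_sizes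
  show (PySem.Dict.empty.update (pvRanges 0 pop_sizes)).items = pvRanges 0 pop_sizes
  rw [show (PySem.Dict.empty.update (pvRanges 0 pop_sizes))
      = (pvRanges 0 pop_sizes).foldl
          (fun (d : PySem.Dict String (Int × Int)) a => d.insert a.1 a.2)
          PySem.Dict.empty from rfl]
  rw [PySem.Dict.items_foldl_insert_fresh (pvRanges 0 pop_sizes) Prod.fst Prod.snd
    PySem.Dict.empty (fun a _ => by simp) (by rw [pvRanges_map_fst]; exact hnd)]
  simp [PySem.Dict.empty]

-- ===== VERDICT (by name: the statement is the Claim_ definition above) =====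
theorem get_pop_gid_ranges_spec : Claim_equal_get_pop_gid_ranges := by
  intro pop_sizes _ hpre
  unfold Spec_get_pop_gid_ranges
  rw [A_char pop_sizes hpre, B_char pop_sizes hpre]
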